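-- pv_equiv track=rewrite | github.com/TateLuo/MorseLink | MorseLink_PC/v1.9/utils/sound.py | _iter_morse_tokens
-- ===== SOURCE A (Python) =====
-- def _iter_morse_tokens(morse_code: str):
--     i = 0
--     s = morse_code or ""
--     while i < len(s):
--         if s.startswith("///", i):
--             yield "///"
--             i += 3
--         else:
--             yield s[i]
--             i += 1
-- ===== SOURCE B (Python) =====
-- def _iter_morse_tokens(morse_code: str):
--     segments = (morse_code or "").split("///")
--     for ch in segments[0]:
--         yield ch
--     for seg in segments[1:]:
--         yield "///"
--         for ch in seg:
--             yield ch
-- ===== Notes on version B (the rewrite author's own statement) =====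
-- stated objective: alternative
-- what changed: B replaces A's per-character index-scanning while loop (a startswith probe at each position) with one str.split on the three-slash separator followed by interleaving the separator between the segments' characters.
import Mathlib
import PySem

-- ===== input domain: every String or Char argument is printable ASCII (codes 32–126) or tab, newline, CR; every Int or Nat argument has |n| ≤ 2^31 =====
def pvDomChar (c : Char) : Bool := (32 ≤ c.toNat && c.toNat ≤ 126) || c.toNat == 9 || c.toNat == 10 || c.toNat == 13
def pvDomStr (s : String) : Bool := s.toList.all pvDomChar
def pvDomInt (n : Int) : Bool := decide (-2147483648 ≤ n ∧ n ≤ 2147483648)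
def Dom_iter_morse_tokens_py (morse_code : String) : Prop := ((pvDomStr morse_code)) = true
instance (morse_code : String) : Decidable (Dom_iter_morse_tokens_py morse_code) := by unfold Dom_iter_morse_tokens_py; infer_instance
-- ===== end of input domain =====

-- B tokenizes by one str.split on the separator and re-interleaving it, instead of A's per-character positional scan (alternative decomposition, same cost).

-- ===== PORT A =====
-- A's while loop over index i, recursing on the remaining suffix of code points:
-- at each step it checks s.startswith("///", i) (= the next three chars are '/'), else yields s[i].
def pvTokA : List Char → List String
  | '/' :: '/' :: '/' :: rest => "///" :: pvTokA rest
  | c :: rest => String.ofList [c] :: pvTokA rest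
  | [] => []

def iter_morse_tokens_py (morse_code : String) : List String :=
  let s := if morse_code = "" then "" else morse_code   -- morse_code or ""
  pvTokA s.toList

-- ===== PORT B =====
-- hand-written port of Python's str.split with the fixed nonempty separator "///"
-- (leftmost non-overlapping matches; n separators give n+1 segments, empty ones kept) — exact for this separator.
def pvSplit3 : List Char → List (List Char)
  | '/' :: '/' :: '/' :: rest => [] :: pvSplit3 rest
  | c :: rest =>
      match pvSplit3 rest with
      | seg :: segs => (c :: seg) :: segs
      | [] => [[c]]
  | [] => [[]]

def iter_morse_tokens_py_alt (morse_code : String) : List String :=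
  let s := if morse_code = "" then "" else morse_code   -- morse_code or ""
  match pvSplit3 s.toList with
  | [] => []
  | first :: rest =>
      first.map (fun c => String.ofList [c])
        ++ rest.flatMap (fun seg => "///" :: seg.map (fun c => String.ofList [c]))

-- ===== PRECONDITION & SPEC =====
def Spec_iter_morse_tokens_py (morse_code : String) (out : List String) : Prop := out = iter_morse_tokens_py_alt morse_code
instance (morse_code : String) (out : List String) : Decidable (Spec_iter_morse_tokens_py morse_code out) := by unfold Spec_iter_morse_tokens_py; infer_instance

-- ===== CLAIM (what is proved, stated in full; the proofs are below) =====
def Claim_equal_iter_morse_tokens_py : Prop := ∀ (morse_code : String), Dom_iter_morse_tokens_py morse_code → Spec_iter_morse_tokens_py morse_code (iter_morse_tokens_py morse_code)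

-- ===== LEMMAS AND PROOFS =====

def pvGlue : List (List Char) → List String
  | [] => []
  | first :: rest =>
      first.map (fun c => String.ofList [c])
        ++ rest.flatMap (fun seg => "///" :: seg.map (fun c => String.ofList [c]))

theorem pvSplit3_ne_nil (l : List Char) : pvSplit3 l ≠ [] := by
  induction l using pvSplit3.induct <;> simp_all [pvSplit3]

theorem pvGlue_cons_nil (segs : List (List Char)) (h : segs ≠ []) :
    pvGlue ([] :: segs) = "///" :: pvGlue segs := by
  cases segs with
  | nil => exact absurd rfl h
  | cons seg segs' => simp [pvGlue]

theorem pvTokA_eq_glue (l : List Char) : pvTokA l = pvGlue (pvSplit3 l) := by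
  induction l using pvSplit3.induct with
  | case1 rest ih =>
      simp only [pvTokA, pvSplit3, ih]
      rw [pvGlue_cons_nil _ (pvSplit3_ne_nil rest)]
  | case2 c rest h seg segs hs ih =>
      rw [pvTokA.eq_def, pvSplit3.eq_def]
      split
      · next heq =>
          exfalso
          injection heq with h1 h2
          exact h _ h1 h2
      · next c' rest' _ heq =>
          injection heq with h1 h2
          subst h1; subst h2
          rw [hs]
          rw [hs] at ih
          simp [pvGlue, ih]
      · next heq => simp at heq
  | case3 c rest h hs ih => exact absurd hs (pvSplit3_ne_nil rest)
  | case4 => simp [pvTokA, pvSplit3, pvGlue]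

-- ===== VERDICT (by name: the statement is the Claim_ definition above) =====
theorem iter_morse_tokens_py_spec : Claim_equal_iter_morse_tokens_py := by
  intro morse_code _
  unfold Spec_iter_morse_tokens_py iter_morse_tokens_py iter_morse_tokens_py_alt
  simp only [pvTokA_eq_glue]
  cases hs : pvSplit3 (if morse_code = "" then "" else morse_code).toList with
  | nil => exact absurd hs (pvSplit3_ne_nil _)
  | cons seg segs => simp [pvGlue]
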